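-- pv_equiv track=rewrite | github.com/dariomx/topcoder-srm | facebook/practice_portal-jul20/recursion/encrypted-words/recursion-encrypted-words.py | findWithCache
-- ===== SOURCE A (Python) =====
-- cache = dict()
--
-- def findWithCache(s):
--     if s in cache:
--         return cache[s]
--     if len(s) == 0:
--         ret = ''
--     else:
--         half, par = divmod(len(s), 2)
--         if par == 0:
--             i = half - 1
--         else:
--             i = half
--         ret = s[i] + findWithCache(s[:i]) + findWithCache(s[i + 1:])
--         cache[s] = ret
--     return ret
-- ===== SOURCE B (Python) =====
-- def findWithCache(s):
--     n = len(s)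
--     out = []
--     stack = [(0, n)]
--     while stack:
--         lo, hi = stack.pop()
--         if lo < hi:
--             i = lo + (hi - lo - 1) // 2
--             out.append(s[i])
--             stack.append((i + 1, hi))
--             stack.append((lo, i))
--     return ''.join(out)
-- ===== Notes on version B (the rewrite author's own statement) =====
-- stated objective: alternative
-- what changed: Replaces the memoised recursion that builds string slices and concatenations at every node with an iterative pre-order DFS over (lo,hi) index ranges on an explicit stack, appending single characters and joining once (no slicing, no recursion, no cache).
import Mathlib
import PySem

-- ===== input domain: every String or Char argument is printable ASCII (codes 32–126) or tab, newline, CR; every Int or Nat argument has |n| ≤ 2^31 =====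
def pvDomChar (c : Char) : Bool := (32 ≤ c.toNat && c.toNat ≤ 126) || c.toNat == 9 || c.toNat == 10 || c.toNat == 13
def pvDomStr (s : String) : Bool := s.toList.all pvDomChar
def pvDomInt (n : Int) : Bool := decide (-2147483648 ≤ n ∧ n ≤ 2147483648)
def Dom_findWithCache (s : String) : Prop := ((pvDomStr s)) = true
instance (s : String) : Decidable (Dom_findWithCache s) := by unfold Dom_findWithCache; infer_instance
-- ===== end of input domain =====

-- B replaces A's memoised recursion (which builds string slices at every node) by an
-- iterative pre-order DFS over (lo,hi) index ranges on an explicit stack: no slicing, no cache.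
-- A's global `cache` only memoises the recursion's own values, so it never changes the
-- returned value; the port is the recursion itself (value-identical).

-- ===== PORT A =====
-- recursion on List Char; s[:i] = take i, s[i+1:] = drop (i+1) (i ≥ 0: exact);
-- s[i] is always in range here (0 ≤ i < len), ported as getD.
def findA (cs : List Char) : List Char :=
  if h : cs.length = 0 then []
  else
    let half := cs.length / 2
    let par := cs.length % 2
    let i := if par = 0 then half - 1 else half
    cs.getD i ' ' :: (findA (cs.take i) ++ findA (cs.drop (i + 1)))
termination_by cs.length
decreasing_by
  · simp only [List.length_take]; split <;> omega
  · simp only [List.length_drop]; split <;> omega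

def findWithCache (s : String) : String := String.mk (findA s.toList)

-- ===== PORT B =====
-- the while-loop over the explicit stack, with the output accumulator `acc`
def goB (cs : List Char) : List (Nat × Nat) → List Char → List Char
  | [], acc => acc
  | (lo, hi) :: st, acc =>
    if h : lo < hi then
      let i := lo + (hi - lo - 1) / 2
      goB cs ((lo, i) :: (i + 1, hi) :: st) (acc ++ [cs.getD i ' '])
    else goB cs st acc
termination_by st => 2 * (st.map (fun p => p.2 - p.1)).sum + st.length
decreasing_by
  · simp only [List.map_cons, List.sum_cons, List.length_cons]; omega
  · simp only [List.map_cons, List.sum_cons, List.length_cons]; omega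

def findWithCache_alt (s : String) : String :=
  String.mk (goB s.toList [(0, s.toList.length)] [])

-- ===== PRECONDITION & SPEC =====
def Spec_findWithCache (s : String) (out : String) : Prop := out = findWithCache_alt s
instance (s : String) (out : String) : Decidable (Spec_findWithCache s out) := by unfold Spec_findWithCache; infer_instance

-- ===== CLAIM (what is proved, stated in full; the proofs are below) =====
def Claim_equal_findWithCache : Prop := ∀ (s : String), Dom_findWithCache s → Spec_findWithCache s (findWithCache s)

-- ===== LEMMAS AND PROOFS =====

-- one-step unfolding of A's recursion on a nonempty list, with the middle index
-- written uniformly as (len-1)/2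
theorem findA_cons (cs : List Char) (h : cs.length ≠ 0) :
    findA cs = cs.getD ((cs.length - 1) / 2) ' '
      :: (findA (cs.take ((cs.length - 1) / 2))
          ++ findA (cs.drop ((cs.length - 1) / 2 + 1))) := by
  rw [findA, dif_neg h]
  simp only
  rw [show (if cs.length % 2 = 0 then cs.length / 2 - 1 else cs.length / 2)
        = (cs.length - 1) / 2 from by split <;> omega]

theorem findA_nil : findA [] = [] := by rw [findA]; simp

-- processing one range (lo,hi) with hi ≤ |cs| appends exactly findA of that segment
theorem goB_range (cs : List Char) :
    ∀ n lo hi, hi - lo = n → hi ≤ cs.length →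
      ∀ st acc, goB cs ((lo, hi) :: st) acc
        = goB cs st (acc ++ findA ((cs.drop lo).take (hi - lo))) := by
  intro n
  induction n using Nat.strong_induction_on with
  | _ n ih =>
    intro lo hi hn hhi st acc
    by_cases hlt : lo < hi
    · have hpos : 0 < hi - lo := by omega
      rw [goB, dif_pos hlt]
      simp only
      set iA := (hi - lo - 1) / 2 with hiA
      have hiAlt : iA < hi - lo := by omega
      rw [ih (lo + iA - lo) (by omega) lo (lo + iA) rfl (by omega)]
      rw [ih (hi - (lo + iA + 1)) (by omega) (lo + iA + 1) hi rfl hhi]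
      set L := (cs.drop lo).take (hi - lo) with hL
      have hlen : L.length = hi - lo := by
        simp [hL, List.length_take, List.length_drop]; omega
      have hfa : findA L
          = L.getD iA ' ' :: (findA (L.take iA) ++ findA (L.drop (iA + 1))) := by
        rw [findA_cons L (by omega)]
        rw [show (L.length - 1) / 2 = iA from by omega]
      have hget : L.getD iA ' ' = cs.getD (lo + iA) ' ' := by
        simp only [List.getD, hL, List.getElem?_take, hiAlt, if_true,
          List.getElem?_drop]
      have htake : L.take iA = (cs.drop lo).take (lo + iA - lo) := by
        rw [hL, List.take_take]; congr 1; omega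
      have hdrop : L.drop (iA + 1)
          = (cs.drop (lo + iA + 1)).take (hi - (lo + iA + 1)) := by
        rw [hL, List.drop_take, List.drop_drop]; congr 1 <;> omega
      rw [hfa, hget, htake, hdrop]
      simp [List.append_assoc]
    · rw [goB, dif_neg hlt]
      rw [show hi - lo = 0 from by omega, List.take_zero, findA_nil]
      simp

theorem goB_whole (cs : List Char) : goB cs [(0, cs.length)] [] = findA cs := by
  rw [goB_range cs cs.length 0 cs.length rfl (le_refl _) [] []]
  simp [goB]

-- ===== VERDICT (by name: the statement is the Claim_ definition above) =====
theorem findWithCache_spec : Claim_equal_findWithCache := by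
  intro s _
  unfold Spec_findWithCache findWithCache findWithCache_alt
  rw [goB_whole]
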